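-- pv_equiv track=rewrite | github.com/qjpike/AoC2020 | 2020_11.py | chk_up
-- ===== SOURCE A (Python) =====
-- def chk_up(field,curr,x_len):
--     if curr - x_len >= 0:
--         if field[curr - x_len] == "#":
--             return True
--         elif field[curr - x_len] == "L":
--             return False
--         else:
--             return chk_up(field,curr - x_len,x_len)
--     else:
--         return False
-- ===== SOURCE B (Python) =====
-- def chk_up(field, curr, x_len):
--     start = curr - x_len
--     if start < 0:
--         return False
--     for p in range(start, -1, -x_len):
--         c = field[p]
--         if c == "#" or c == "L":
--             return c == "#"
--     return False
-- ===== Notes on version B (the rewrite author's own statement) =====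
-- stated objective: alternative
-- what changed: Replaced the tail recursion on the cursor with a for loop over an explicitly materialised range(start, -1, -x_len) of candidate positions, returning at the first seat cell; the Lean port is a findSome? scan over PySem.List.pyRange instead of a fuel recursion.
-- outside the precondition, e.g. on chk_up(['#'], -3, -3): A returns True, B returns False; on chk_up(['#'], 0, 0): A returns True, B raises ValueError
import Mathlib
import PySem

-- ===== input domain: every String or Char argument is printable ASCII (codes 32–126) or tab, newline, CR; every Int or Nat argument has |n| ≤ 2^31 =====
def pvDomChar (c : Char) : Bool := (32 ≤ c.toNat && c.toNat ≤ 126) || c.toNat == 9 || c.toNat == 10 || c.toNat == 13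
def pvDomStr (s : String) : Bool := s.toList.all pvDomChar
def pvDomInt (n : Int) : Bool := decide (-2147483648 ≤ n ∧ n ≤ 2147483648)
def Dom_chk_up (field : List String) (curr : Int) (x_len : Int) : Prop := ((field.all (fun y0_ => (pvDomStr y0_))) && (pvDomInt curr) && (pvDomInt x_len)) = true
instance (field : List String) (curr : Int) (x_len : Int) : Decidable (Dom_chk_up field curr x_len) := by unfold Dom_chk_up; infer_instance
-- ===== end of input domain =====

-- B replaces A's tail recursion by a for loop over the materialised list of candidate
-- positions range(curr - x_len, -1, -x_len), returning at the first seat cell; same value.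

-- ===== PORT A =====
-- A's recursion is not structurally decreasing for x_len ≤ 0 (Python overflows the stack /
-- raises IndexError there, outside Pre_); fuel field.length + 1 is enough on Pre_.
def chk_upGo (fuel : Nat) (field : List String) (curr : Int) (x_len : Int) : Bool :=
  match fuel with
  | 0 => false
  | fuel + 1 =>
    if curr - x_len ≥ 0 then
      match PySem.List.pyGet? field (curr - x_len) with
      | none => false   -- Python raises IndexError here (excluded by Pre_)
      | some c =>
        if c = "#" then true
        else if c = "L" then false
        else chk_upGo fuel field (curr - x_len) x_len
    else false

def chk_up (field : List String) (curr : Int) (x_len : Int) : Bool :=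
  chk_upGo (field.length + 1) field curr x_len

-- ===== PORT B =====
-- the for-loop body of Source B: at position p, return True/False on a seat, else keep scanning
def seatAt (field : List String) (p : Int) : Option Bool :=
  match PySem.List.pyGet? field p with
  | none => some false   -- Python raises IndexError here (excluded by Pre_)
  | some c => if c = "#" ∨ c = "L" then some (decide (c = "#")) else none

def chk_up_alt (field : List String) (curr : Int) (x_len : Int) : Bool :=
  if curr - x_len < 0 then false
  else ((PySem.List.pyRange (curr - x_len) (-1) (-x_len)).findSome? (seatAt field)).getD false

-- ===== PRECONDITION & SPEC =====
-- Pre_ excludes exactly the inputs where the upward scan leaves the board or never terminates: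
-- for x_len ≥ 1 the scan stays in range iff curr - x_len < len(field) (A raises IndexError
-- otherwise); for x_len ≤ 0 with curr - x_len ≥ 0 A walks upward or in place and raises
-- IndexError/RecursionError, except in the accidental case where it happens to hit a seat
-- cell first (cited in claim.json); curr - x_len < 0 returns False immediately for any x_len.
def Pre_chk_up (field : List String) (curr : Int) (x_len : Int) : Prop :=
  (1 ≤ x_len ∧ curr - x_len < field.length) ∨ curr - x_len < 0
instance (field : List String) (curr : Int) (x_len : Int) : Decidable (Pre_chk_up field curr x_len) := by unfold Pre_chk_up; infer_instance

def pvWitness_chk_up : List String × Int × Int := (["L", ".", "#", "."], 3, 1)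

def Spec_chk_up (field : List String) (curr : Int) (x_len : Int) (out : Bool) : Prop := out = chk_up_alt field curr x_len
instance (field : List String) (curr : Int) (x_len : Int) (out : Bool) : Decidable (Spec_chk_up field curr x_len out) := by unfold Spec_chk_up; infer_instance

-- ===== CLAIM (what is proved, stated in full; the proofs are below) =====
def Claim_equal_chk_up : Prop := ∀ (field : List String) (curr : Int) (x_len : Int), Dom_chk_up field curr x_len → Pre_chk_up field curr x_len → Spec_chk_up field curr x_len (chk_up field curr x_len)

-- ===== LEMMAS AND PROOFS =====

-- range(a, -1, -k) is empty once the cursor has left the board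
theorem pyRange_negk_nil (a k : Int) (hk : 1 ≤ k) (ha : a < 0) :
    PySem.List.pyRange a (-1) (-k) = [] := by
  rw [PySem.List.pyRange_of_neg a (-1) (by omega)]
  simp [show ¬((-1:Int) < a) by omega]

-- range(a, -1, -k) peels its head position while the cursor is on the board
theorem pyRange_negk_cons (a k : Int) (hk : 1 ≤ k) (ha : 0 ≤ a) :
    PySem.List.pyRange a (-1) (-k) = a :: PySem.List.pyRange (a - k) (-1) (-k) := by
  rw [PySem.List.pyRange_of_neg a (-1) (by omega),
      PySem.List.pyRange_of_neg (a - k) (-1) (by omega)]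
  have h1 : (-1:Int) < a := by omega
  have hk0 : k ≠ 0 := by omega
  rw [if_pos h1]
  have hdiv : (a + 1 * k) / k = a / k + 1 := Int.add_mul_ediv_right a 1 hk0
  have hq : 0 ≤ a / k := Int.ediv_nonneg ha (by omega)
  have hcount : ((a - -1 + k - 1) / k).toNat = (a / k).toNat + 1 := by
    rw [show a - -1 + k - 1 = a + 1 * k by ring, hdiv]; omega
  have htail : (if (-1:Int) < a - k then ((a - k - -1 + k - 1) / k).toNat else 0)
      = (a / k).toNat := by
    by_cases h2 : (-1:Int) < a - k
    · rw [if_pos h2, show a - k - -1 + k - 1 = a by ring]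
    · rw [if_neg h2]
      have : a / k = 0 := Int.ediv_eq_zero_of_lt ha (by omega)
      simp [this]
  simp only [neg_neg]
  rw [hcount, htail, List.range_succ_eq_map, List.map_cons, List.map_map]
  refine List.cons_eq_cons.mpr ⟨by simp, ?_⟩
  apply List.map_congr_left
  intro j _
  simp only [Function.comp_apply, Nat.succ_eq_add_one]
  push_cast
  ring

-- the recursion of A and the range scan of B visit the same cells in the same order
theorem chk_upGo_eq_scan (fuel : Nat) (field : List String) (p x_len : Int)
    (hx : 1 ≤ x_len) (hf : p < (fuel : Int)) (hlen : p < (field.length : Int)) :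
    chk_upGo fuel field (p + x_len) x_len =
      ((PySem.List.pyRange p (-1) (-x_len)).findSome? (seatAt field)).getD false := by
  induction fuel generalizing p with
  | zero =>
    have : p < 0 := by exact_mod_cast hf
    rw [pyRange_negk_nil p x_len hx this]
    rfl
  | succ n ih =>
    by_cases hp : 0 ≤ p
    · rw [pyRange_negk_cons p x_len hx hp]
      have hsub : p + x_len - x_len = p := by ring
      simp only [chk_upGo, hsub]
      rw [if_pos (by omega)]
      cases hg : PySem.List.pyGet? field p with
      | none => simp [seatAt, hg]
      | some c =>
        by_cases h1 : c = "#"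
        · simp [seatAt, hg, h1]
        · by_cases h2 : c = "L"
          · simp [seatAt, hg, h2]
          · have hrec := ih (p - x_len) (by push_cast at hf ⊢; omega) (by omega)
            have heq : p - x_len + x_len = p := by ring
            rw [heq] at hrec
            simp [seatAt, hg, h1, h2, hrec]
    · push Not at hp
      rw [pyRange_negk_nil p x_len hx hp]
      simp only [chk_upGo]
      rw [if_neg (by omega)]
      rfl

-- ===== VERDICT (by name: the statement is the Claim_ definition above) =====
theorem chk_up_spec : Claim_equal_chk_up := by
  intro field curr x_len _ hpre
  unfold Spec_chk_up chk_up chk_up_alt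
  by_cases hneg : curr - x_len < 0
  · rw [if_pos hneg]
    show chk_upGo (field.length + 1) field curr x_len = false
    cases field.length with
    | zero => simp only [chk_upGo]; rw [if_neg (by omega)]
    | succ n => simp only [chk_upGo]; rw [if_neg (by omega)]
  · rw [if_neg hneg]
    rcases hpre with ⟨hx, hlt⟩ | h
    · have h := chk_upGo_eq_scan (field.length + 1) field (curr - x_len) x_len hx
        (by push_cast; omega) (by exact_mod_cast hlt)
      rw [show curr - x_len + x_len = curr by ring] at h
      exact h
    · omega
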